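-- pv_equiv track=rewrite | github.com/stasm-skypro/codewars-5-kyu | Langtons Ant/Langton's Ant2 2.py | get_ant_pos
-- ===== SOURCE A (Python) =====
-- def get_ant_pos(board, c, r, n, dir):
--     def board_to_maps2(lst):
--         """Convert list in to dict."""
--         dic = dict()
--         for i, row in enumerate(lst):
--             for j, el in enumerate(row):
--                 dic[(i, j)] = el
--         return dic
--
--     def get_idx(dic: dict):
--         """Creat two lists with item indexes: one for rows, one for columns."""
--         ridx = []
--         cidx = []
--         for k in dic.keys():
--             ridx.append(k[0])
--             cidx.append(k[1])
--         return ridx, cidx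
--
--     def recalc_idx(lst_idx, shift):
--         """Recalculate indexes if indexes are less to zero."""
--         for i, _ in enumerate(lst_idx):
--             lst_idx[i] = lst_idx[i] + shift
--         return lst_idx
--
--     def renew_keys(src, keys: list):
--         """Renews the maps keys."""
--         res = dict(zip(keys, list(src.values())))
--         return res
--
--     def maps_to_board2(dic: dict):
--         """Convert dict to list."""
--         ridx, cidx = get_idx(dic)
--         rmax, cmax = max(ridx), max(cidx)
--         lst = [[0] * (cmax + 1) for _ in range(rmax + 1)]
--         for k, v in dic.items():
--             i, j = k
--             lst[i][j] = v
--         return lst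
--
--     maps = board_to_maps2(board)
--
--     from collections import deque
--     increments = deque([(-1, 0), (0, -1), (1, 0), (0, 1)])
--     if dir in [1, 2, 3]:
--         increments.rotate(dir)
--
--     for k in range(1, n + 1):
--         pos = r, c
--         val = maps[pos]
--         maps[pos] = int(not val)
--         increments.rotate(1) if val == 1 else increments.rotate(-1)
--         (dr, dc) = increments[0]
--         r, c = r + dr, c + dc
--         pos = (r, c)
--         if pos not in maps:
--             maps[pos] = 0
--
--     ridx, cidx = get_idx(maps)
--     rmin, rmax = min(ridx), max(ridx)
--     cmin, cmax = min(cidx), max(cidx)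
--
--     if rmin < 0:
--         rshift = abs(rmin)
--         ridx = recalc_idx(ridx, rshift)
--
--     if cmin < 0:
--         cshift = abs(cmin)
--         cidx = recalc_idx(cidx, cshift)
--
--     maps = renew_keys(maps, zip(ridx, cidx))
--
--     board = maps_to_board2(maps)
--     return board
-- ===== SOURCE B (Python) =====
-- def get_ant_pos(board, c, r, n, dir):
--     # Dense list-of-lists grid grown at the edges as the ant walks off it;
--     # no dict, no deque, no final key-shift/rebuild pass.
--     H = 0  # 1 + index of the last non-empty row (trailing empty rows hold no cell)
--     W = 0  # widest row
--     for i, row in enumerate(board):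
--         if row:
--             H = i + 1
--         if len(row) > W:
--             W = len(row)
--     grid = [[row[j] if j < len(row) else 0 for j in range(W)]
--             for row in board[:H]]
--     DR = [-1, 0, 1, 0]
--     DC = [0, -1, 0, 1]
--     d = (-dir) % 4 if dir in (1, 2, 3) else 0
--     for _ in range(n):
--         val = grid[r][c]
--         grid[r][c] = 0 if val else 1
--         d = (d - 1) % 4 if val == 1 else (d + 1) % 4
--         r += DR[d]
--         c += DC[d]
--         if r < 0:
--             grid.insert(0, [0] * len(grid[0]))
--             r = 0
--         elif r == len(grid):
--             grid.append([0] * len(grid[0]))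
--         if c < 0:
--             for row in grid:
--                 row.insert(0, 0)
--             c = 0
--         elif c == len(grid[0]):
--             for row in grid:
--                 row.append(0)
--     return grid
-- ===== Notes on version B (the rewrite author's own statement) =====
-- stated objective: alternative
-- what changed: B replaces A's sparse dict-of-cells plus rotated deque plus post-hoc key extraction/shifting/rebuild with a dense list-of-lists grid that is grown in place (prepend/append a zero row or column) whenever the ant steps off an edge, a direction index mod 4, and returns the grown grid directly.
import Mathlib
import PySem

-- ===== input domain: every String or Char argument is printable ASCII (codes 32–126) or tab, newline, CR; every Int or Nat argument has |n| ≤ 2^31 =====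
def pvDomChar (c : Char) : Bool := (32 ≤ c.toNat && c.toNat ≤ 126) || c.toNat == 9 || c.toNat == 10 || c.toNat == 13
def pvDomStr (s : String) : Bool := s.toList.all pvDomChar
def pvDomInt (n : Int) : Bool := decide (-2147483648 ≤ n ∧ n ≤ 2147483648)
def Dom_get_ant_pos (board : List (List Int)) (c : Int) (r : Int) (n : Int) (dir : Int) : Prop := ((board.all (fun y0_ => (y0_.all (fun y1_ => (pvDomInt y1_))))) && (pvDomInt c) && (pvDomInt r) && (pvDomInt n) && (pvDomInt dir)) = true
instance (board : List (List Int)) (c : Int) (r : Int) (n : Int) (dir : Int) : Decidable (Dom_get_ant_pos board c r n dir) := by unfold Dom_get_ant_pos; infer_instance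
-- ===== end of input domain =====

-- B replaces A's sparse dict of cells + rotated deque + final key-shift/rebuild passes by a
-- dense list-of-lists grid grown in place at its edges as the ant walks off it, with the
-- direction kept as an index mod 4; the grown grid is returned directly.

-- ===== PORT A =====
-- board_to_maps2: dic[(i, j)] = el over enumerate
def pvA_boardToMaps2 (lst : List (List Int)) : PySem.Dict (Int × Int) Int :=
  (PySem.List.enumerate lst).foldl
    (fun dic iRow =>
      (PySem.List.enumerate iRow.2).foldl
        (fun dic jEl => dic.insert (iRow.1, jEl.1) jEl.2) dic)
    PySem.Dict.empty

-- get_idx: two appended index lists over dic.keys()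
def pvA_getIdx (dic : PySem.Dict (Int × Int) Int) : List Int × List Int :=
  dic.keys.foldl (fun p k => (p.1 ++ [k.1], p.2 ++ [k.2])) ([], [])

-- recalc_idx: for i: lst_idx[i] = lst_idx[i] + shift
def pvA_recalcIdx (lstIdx : List Int) (shift : Int) : List Int :=
  (PySem.List.enumerate lstIdx).foldl
    (fun l iv => PySem.List.pySetD l iv.1 (PySem.List.pyGetD l iv.1 0 + shift)) lstIdx

-- renew_keys: dict(zip(keys, list(src.values())))
def pvA_renewKeys (src : PySem.Dict (Int × Int) Int) (keys : List (Int × Int)) :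
    PySem.Dict (Int × Int) Int :=
  PySem.Dict.ofList (keys.zip src.values)

-- maps_to_board2: zero grid of the key extent, then lst[i][j] = v over items
def pvA_mapsToBoard2 (dic : PySem.Dict (Int × Int) Int) : List (List Int) :=
  let rc := pvA_getIdx dic
  let rmax := (PySem.List.max? rc.1 (fun y => y)).getD 0
  let cmax := (PySem.List.max? rc.2 (fun y => y)).getD 0
  let lst := List.replicate (rmax + 1).toNat (List.replicate (cmax + 1).toNat (0 : Int))
  dic.items.foldl (fun lst kv =>
    PySem.List.pySetD lst kv.1.1
      (PySem.List.pySetD (PySem.List.pyGetD lst kv.1.1 []) kv.1.2 kv.2)) lst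

-- deque.rotate(1) and deque.rotate(-1)
def pvA_rot1 (dq : List (Int × Int)) : List (Int × Int) :=
  dq.drop (dq.length - 1) ++ dq.take (dq.length - 1)
def pvA_rotNeg1 (dq : List (Int × Int)) : List (Int × Int) :=
  dq.drop 1 ++ dq.take 1

-- one iteration of A's `for k in range(1, n + 1)` body
def pvStepA (st : PySem.Dict (Int × Int) Int × Int × Int × List (Int × Int)) :
    PySem.Dict (Int × Int) Int × Int × Int × List (Int × Int) :=
  let maps := st.1; let r := st.2.1; let c := st.2.2.1; let inc := st.2.2.2
  let pos := (r, c)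
  let val := maps.getD pos 0                               -- maps[pos]; key present under Pre_
  let maps := maps.insert pos (if val = 0 then 1 else 0)   -- int(not val)
  let inc := if val = 1 then pvA_rot1 inc else pvA_rotNeg1 inc
  let drdc := PySem.List.pyGetD inc 0 ((0 : Int), (0 : Int))  -- increments[0]
  let r := r + drdc.1
  let c := c + drdc.2
  let maps := if maps.contains (r, c) then maps else maps.insert (r, c) 0
  (maps, r, c, inc)

def get_ant_pos (board : List (List Int)) (c : Int) (r : Int) (n : Int) (dir : Int) :
    List (List Int) :=
  let maps := pvA_boardToMaps2 board
  let increments : List (Int × Int) := [(-1, 0), (0, -1), (1, 0), (0, 1)]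
  let increments :=
    if dir = 1 ∨ dir = 2 ∨ dir = 3 then pvA_rot1^[dir.toNat] increments else increments
  let st := (PySem.List.pyRange 1 (n + 1) 1).foldl (fun st _k => pvStepA st)
    (maps, r, c, increments)
  let maps := st.1
  let rc := pvA_getIdx maps
  let rmin := (PySem.List.min? rc.1 (fun y => y)).getD 0
  let cmin := (PySem.List.min? rc.2 (fun y => y)).getD 0
  let ridx := if rmin < 0 then pvA_recalcIdx rc.1 (rmin.natAbs : Int) else rc.1
  let cidx := if cmin < 0 then pvA_recalcIdx rc.2 (cmin.natAbs : Int) else rc.2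
  let maps := pvA_renewKeys maps (ridx.zip cidx)
  pvA_mapsToBoard2 maps

-- ===== PORT B =====
-- one iteration of B's `for _ in range(n)` body: toggle, turn, move, then grow the
-- grid at whichever edge the ant stepped off (prepend/append a zero row/column)
def pvStepB (st : List (List Int) × Int × Int × Int) : List (List Int) × Int × Int × Int :=
  let g := st.1; let r := st.2.1; let c := st.2.2.1; let d := st.2.2.2
  let val := PySem.List.pyGetD (PySem.List.pyGetD g r []) c 0        -- grid[r][c]
  let g := PySem.List.pySetD g r
    (PySem.List.pySetD (PySem.List.pyGetD g r []) c (if val ≠ 0 then 0 else 1))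
  let d := if val = 1 then PySem.Int.mod (d - 1) 4 else PySem.Int.mod (d + 1) 4
  let r := r + PySem.List.pyGetD [(-1 : Int), 0, 1, 0] d 0           -- DR[d]
  let c := c + PySem.List.pyGetD [(0 : Int), -1, 0, 1] d 0           -- DC[d]
  let gr : List (List Int) × Int :=
    if r < 0 then
      (List.replicate (PySem.List.pyGetD g 0 []).length (0 : Int) :: g, 0)
    else if r = (g.length : Int) then
      (g ++ [List.replicate (PySem.List.pyGetD g 0 []).length (0 : Int)], r)
    else (g, r)
  let g := gr.1
  let r := gr.2
  let gc : List (List Int) × Int :=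
    if c < 0 then (g.map (fun row => (0 : Int) :: row), 0)
    else if c = ((PySem.List.pyGetD g 0 []).length : Int) then
      (g.map (fun row => row ++ [0]), c)
    else (g, c)
  (gc.1, r, gc.2, d)

def get_ant_pos_alt (board : List (List Int)) (c : Int) (r : Int) (n : Int) (dir : Int) :
    List (List Int) :=
  -- H = 1 + index of the last non-empty row, W = widest row
  let hw := (PySem.List.enumerate board).foldl
    (fun (hw : Int × Int) iRow =>
      (if !iRow.2.isEmpty then iRow.1 + 1 else hw.1,
       if (iRow.2.length : Int) > hw.2 then (iRow.2.length : Int) else hw.2))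
    ((0 : Int), (0 : Int))
  -- grid = rows of board[:H], each padded with zeros to width W
  let grid := (PySem.List.slice board none (some hw.1)).map (fun row =>
    (PySem.List.pyRange 0 hw.2 1).map (fun j =>
      if j < (row.length : Int) then PySem.List.pyGetD row j 0 else 0))
  let d0 : Int := if dir = 1 ∨ dir = 2 ∨ dir = 3 then PySem.Int.mod (-dir) 4 else 0
  let st := (PySem.List.pyRange 0 n 1).foldl (fun st _k => pvStepB st) (grid, r, c, d0)
  st.1

-- ===== PRECONDITION & SPEC =====
-- Pre_ excludes exactly the inputs where A raises: a board with no cell at all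
-- (min() of an empty sequence → ValueError) and n ≥ 1 with the start position not a
-- cell of the board (maps[pos] → KeyError).
def Pre_get_ant_pos (board : List (List Int)) (c : Int) (r : Int) (n : Int) (dir : Int) : Prop :=
  (board.any (fun row => !row.isEmpty) = true) ∧
  (0 < n → 0 ≤ r ∧ r.toNat < board.length ∧ 0 ≤ c ∧ c.toNat < (board.getD r.toNat []).length)
instance (board : List (List Int)) (c : Int) (r : Int) (n : Int) (dir : Int) : Decidable (Pre_get_ant_pos board c r n dir) := by unfold Pre_get_ant_pos; infer_instance
def pvWitness_get_ant_pos : List (List Int) × Int × Int × Int × Int := ([[1, 0], [0, 1]], 0, 0, 3, 1)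

def Spec_get_ant_pos (board : List (List Int)) (c : Int) (r : Int) (n : Int) (dir : Int) (out : List (List Int)) : Prop := out = get_ant_pos_alt board c r n dir
instance (board : List (List Int)) (c : Int) (r : Int) (n : Int) (dir : Int) (out : List (List Int)) : Decidable (Spec_get_ant_pos board c r n dir out) := by unfold Spec_get_ant_pos; infer_instance

-- ===== CLAIM (what is proved, stated in full; the proofs are below) =====
def Claim_equal_get_ant_pos : Prop := ∀ (board : List (List Int)) (c : Int) (r : Int) (n : Int) (dir : Int), Dom_get_ant_pos board c r n dir → Pre_get_ant_pos board c r n dir → Spec_get_ant_pos board c r n dir (get_ant_pos board c r n dir)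

-- ===== LEMMAS AND PROOFS =====

-- the cyclic state of A's deque when B's direction index is d
def pvCyc (d : Int) : List (Int × Int) :=
  if d = 1 then [(0, -1), (1, 0), (0, 1), (-1, 0)]
  else if d = 2 then [(1, 0), (0, 1), (-1, 0), (0, -1)]
  else if d = 3 then [(0, 1), (-1, 0), (0, -1), (1, 0)]
  else [(-1, 0), (0, -1), (1, 0), (0, 1)]

-- the key list A's initial dict ends up with
def pvKeyList (rows : List (List Int)) (s : Int) : List (Int × Int) :=
  (PySem.List.enumerate rows s).flatMap
    (fun iRow => (PySem.List.enumerate iRow.2).map (fun jv => (iRow.1, jv.1)))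

-- the key/value list A's initial dict ends up with
def pvKVList (rows : List (List Int)) (s : Int) : List ((Int × Int) × Int) :=
  (PySem.List.enumerate rows s).flatMap
    (fun iRow => (PySem.List.enumerate iRow.2).map (fun jv => ((iRow.1, jv.1), jv.2)))

-- B's grid when A's dict is m and the bounding box is [rlo..rhi] × [clo..chi]
def pvRender (m : PySem.Dict (Int × Int) Int) (rlo rhi clo chi : Int) : List (List Int) :=
  (PySem.List.pyRange rlo (rhi + 1) 1).map (fun i =>
    (PySem.List.pyRange clo (chi + 1) 1).map (fun j => m.getD (i, j) 0))

-- the coupling invariant between A's and B's loop states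
def pvRel (a : PySem.Dict (Int × Int) Int × Int × Int × List (Int × Int))
    (b : List (List Int) × Int × Int × Int) : Prop :=
  a.1.keys.Nodup ∧
  (∃ k ∈ a.1.keys, 0 ≤ k.1 ∧ 0 ≤ k.2) ∧
  a.2.1 = b.2.1 + (a.1.keys.map Prod.fst).foldl min 0 ∧
  a.2.2.1 = b.2.2.1 + (a.1.keys.map Prod.snd).foldl min 0 ∧
  (b.2.2.2 = 0 ∨ b.2.2.2 = 1 ∨ b.2.2.2 = 2 ∨ b.2.2.2 = 3) ∧
  a.2.2.2 = pvCyc b.2.2.2 ∧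
  b.1 = pvRender a.1 ((a.1.keys.map Prod.fst).foldl min 0) ((a.1.keys.map Prod.fst).foldl max 0)
    ((a.1.keys.map Prod.snd).foldl min 0) ((a.1.keys.map Prod.snd).foldl max 0)

def pvInv (a : PySem.Dict (Int × Int) Int × Int × Int × List (Int × Int))
    (b : List (List Int) × Int × Int × Int) : Prop :=
  pvRel a b ∧ a.1.contains (a.2.1, a.2.2.1) = true

theorem pvFoldConst {α σ : Type} (l : List α) (f : σ → σ) (init : σ) :
    l.foldl (fun s _ => f s) init = f^[l.length] init := by
  induction l generalizing init with
  | nil => rfl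
  | cons x xs ih => simp [List.foldl_cons, ih, Function.iterate_succ_apply]

theorem pvFoldMinNonneg (t : List Int) (h : ∀ x ∈ t, 0 ≤ x) : t.foldl min 0 = 0 := by
  induction t with
  | nil => rfl
  | cons x xs ih =>
    simp only [List.foldl_cons, min_eq_left (h x (by simp))]
    exact ih fun y hy => h y (by simp [hy])


theorem pvKeyList_bounds (rows : List (List Int)) (s : Int) :
    ∀ p ∈ pvKeyList rows s, s ≤ p.1 ∧ 0 ≤ p.2 := by
  intro p hp
  simp only [pvKeyList, List.mem_flatMap] at hp
  obtain ⟨iRow, hi, hp⟩ := hp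
  obtain ⟨k, hk, rfl⟩ := (PySem.List.mem_enumerate_iff rows s iRow).mp hi
  simp only [List.mem_map] at hp
  obtain ⟨jv, hj, rfl⟩ := hp
  obtain ⟨m, hm, rfl⟩ := (PySem.List.mem_enumerate_iff _ 0 jv).mp hj
  constructor <;> simp

theorem pvKeyList_nodup (rows : List (List Int)) (s : Int) : (pvKeyList rows s).Nodup := by
  induction rows generalizing s with
  | nil => simp [pvKeyList, PySem.List.enumerate]
  | cons x xs ih =>
    simp only [pvKeyList, PySem.List.enumerate_cons, List.flatMap_cons]
    rw [List.nodup_append]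
    refine ⟨?_, ih (s + 1), ?_⟩
    · have h1 : (PySem.List.enumerate x 0).map (fun jv => ((s : Int), jv.1)) =
          ((PySem.List.enumerate x 0).map (fun jv => jv.1)).map (fun j => ((s : Int), j)) := by
        rw [List.map_map]; rfl
      rw [h1]
      refine List.Nodup.map (fun a b hab => ?_) ?_
      · exact congrArg Prod.snd hab
      · have := PySem.List.map_fst_enumerate x 0
        rw [show (fun (x : Int × Int) => x.1) = (Prod.fst : Int × Int → Int) from rfl] at this
        rw [show (fun (jv : Int × Int) => jv.1) = (Prod.fst : Int × Int → Int) from rfl, this]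
        exact PySem.List.nodup_pyRange_one _ _
    · intro a ha b hb
      simp only [List.mem_map] at ha
      obtain ⟨jv, _, rfl⟩ := ha
      have hbs := (pvKeyList_bounds xs (s + 1) b hb).1
      intro hcon
      rw [← hcon] at hbs
      simp at hbs

theorem pvRotR (d : Int) (h : d = 0 ∨ d = 1 ∨ d = 2 ∨ d = 3) :
    pvA_rot1 (pvCyc d) = pvCyc (PySem.Int.mod (d - 1) 4) ∧
    (PySem.Int.mod (d - 1) 4 = 0 ∨ PySem.Int.mod (d - 1) 4 = 1 ∨
     PySem.Int.mod (d - 1) 4 = 2 ∨ PySem.Int.mod (d - 1) 4 = 3) := by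
  rcases h with h | h | h | h <;> subst h <;> exact ⟨by decide, by decide⟩

theorem pvRotL (d : Int) (h : d = 0 ∨ d = 1 ∨ d = 2 ∨ d = 3) :
    pvA_rotNeg1 (pvCyc d) = pvCyc (PySem.Int.mod (d + 1) 4) ∧
    (PySem.Int.mod (d + 1) 4 = 0 ∨ PySem.Int.mod (d + 1) 4 = 1 ∨
     PySem.Int.mod (d + 1) 4 = 2 ∨ PySem.Int.mod (d + 1) 4 = 3) := by
  rcases h with h | h | h | h <;> subst h <;> exact ⟨by decide, by decide⟩

theorem pvKeyList_ne (rows : List (List Int))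
    (h : rows.any (fun row => !row.isEmpty) = true) : pvKeyList rows 0 ≠ [] := by
  simp only [List.any_eq_true, Bool.not_eq_true', List.isEmpty_eq_false_iff] at h
  obtain ⟨row, hmem, hne⟩ := h
  obtain ⟨k, hk, rfl⟩ := List.mem_iff_getElem.mp hmem
  intro hnil
  rw [pvKeyList, List.flatMap_eq_nil_iff] at hnil
  have hin : ((k : Int), rows[k]) ∈ PySem.List.enumerate rows 0 :=
    (PySem.List.mem_enumerate_iff rows 0 _).mpr ⟨k, hk, by simp⟩
  have := hnil _ hin
  rw [List.map_eq_nil_iff] at this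
  apply hne
  have hlen := PySem.List.length_enumerate (xs := rows[k]) (s := 0)
  rw [this] at hlen
  exact List.eq_nil_of_length_eq_zero hlen.symm

theorem pvKeyList_mem (rows : List (List Int)) (r c : Int) (h1 : 0 ≤ r)
    (h2 : r.toNat < rows.length) (h3 : 0 ≤ c)
    (h4 : c.toNat < (rows.getD r.toNat []).length) : (r, c) ∈ pvKeyList rows 0 := by
  rw [List.getD_eq_getElem rows [] h2] at h4
  simp only [pvKeyList, List.mem_flatMap]
  refine ⟨((r.toNat : Int), rows[r.toNat]), ?_, ?_⟩
  · exact (PySem.List.mem_enumerate_iff rows 0 _).mpr ⟨r.toNat, h2, by simp⟩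
  · simp only [List.mem_map]
    refine ⟨((c.toNat : Int), rows[r.toNat][c.toNat]), ?_, ?_⟩
    · exact (PySem.List.mem_enumerate_iff _ 0 _).mpr ⟨c.toNat, h4, by simp⟩
    · simp [Prod.ext_iff]
      constructor <;> omega

theorem pvRecalcAux (s : Int) (xs pre : List Int) :
    (PySem.List.enumerate xs (pre.length : Int)).foldl
      (fun l iv => PySem.List.pySetD l iv.1 (PySem.List.pyGetD l iv.1 0 + s)) (pre ++ xs)
    = pre ++ xs.map (fun x => x + s) := by
  induction xs generalizing pre with
  | nil => simp [PySem.List.enumerate]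
  | cons x xs ih =>
    rw [PySem.List.enumerate_cons, List.foldl_cons]
    have hg : PySem.List.pyGetD (pre ++ x :: xs) (pre.length : Int) 0 = x := by
      rw [PySem.List.pyGetD_natCast]
      rw [List.getD_eq_getElem _ _ (by simp)]
      rw [List.getElem_append_right (le_refl pre.length)]
      simp
    have hs : PySem.List.pySetD (pre ++ x :: xs) (pre.length : Int) (x + s) =
        (pre ++ [x + s]) ++ xs := by
      rw [PySem.List.pySetD_natCast, List.set_append]
      simp
    rw [hg, hs]
    have hlen : ((pre.length : Int) + 1) = (((pre ++ [x + s]).length : Nat) : Int) := by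
      simp
    rw [hlen, ih (pre ++ [x + s])]
    simp

theorem pvRecalc (l : List Int) (s : Int) : pvA_recalcIdx l s = l.map (fun x => x + s) := by
  have := pvRecalcAux s l []
  simpa [pvA_recalcIdx] using this

theorem pvFoldMaxShift (t : List Int) (a s : Int) :
    (t.map (fun x => x + s)).foldl max (a + s) = t.foldl max a + s := by
  induction t generalizing a with
  | nil => rfl
  | cons x xs ih =>
    simp only [List.map_cons, List.foldl_cons]
    rw [max_add_add_right, ih]

theorem pvFindEq {α : Type} [DecidableEq α] (K : List α) (p : α → Bool) (k0 : α)
    (hp : ∀ k, p k = true ↔ k = k0) :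
    K.find? p = if k0 ∈ K then some k0 else none := by
  induction K with
  | nil => simp
  | cons x xs ih =>
    by_cases hx : p x = true
    · have := (hp x).mp hx
      subst this
      simp [List.find?_cons_of_pos hx]
    · have hne : x ≠ k0 := fun hcon => hx ((hp x).mpr hcon)
      rw [List.find?_cons_of_neg hx, ih]
      by_cases hm : k0 ∈ xs
      · rw [if_pos hm, if_pos (List.mem_cons_of_mem _ hm)]
      · rw [if_neg hm, if_neg (by simp [hne.symm, hm])]

theorem pvSetEntry (g : List (List Int)) (L : Nat) (hrow : ∀ row ∈ g, row.length = L)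
    (a b : Nat) (v : Int) (ha : a < g.length) (hb : b < L) (x y : Nat)
    (hx : x < g.length) (hy : y < L) :
    ((g.set a ((g[a]'ha).set b v)).getD x []).getD y 0 =
      if a = x ∧ b = y then v else (g.getD x []).getD y 0 := by
  rw [List.getD_eq_getElem (g.set a ((g[a]'ha).set b v)) [] (by simpa using hx),
    List.getElem_set]
  by_cases hax : a = x
  · subst hax
    rw [if_pos rfl]
    rw [List.getD_eq_getElem _ _ (by rw [List.length_set, hrow _ (List.getElem_mem ha)]; exact hy),
      List.getElem_set]
    by_cases hby : b = y
    · rw [if_pos hby, if_pos ⟨rfl, hby⟩]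
    · rw [if_neg hby, if_neg (by tauto)]
      rw [List.getD_eq_getElem _ _ hx,
        List.getD_eq_getElem _ _ (by rw [hrow _ (List.getElem_mem hx)]; exact hy)]
  · rw [if_neg hax, if_neg (by tauto), List.getD_eq_getElem _ _ hx]

theorem pvGridFold (ps : List ((Int × Int) × Int)) (g : List (List Int)) (L : Nat)
    (hrow : ∀ row ∈ g, row.length = L)
    (hnd : (ps.map Prod.fst).Nodup)
    (hin : ∀ p ∈ ps, 0 ≤ p.1.1 ∧ p.1.1.toNat < g.length ∧ 0 ≤ p.1.2 ∧ p.1.2.toNat < L) :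
    (ps.foldl (fun lst kv => PySem.List.pySetD lst kv.1.1
        (PySem.List.pySetD (PySem.List.pyGetD lst kv.1.1 []) kv.1.2 kv.2)) g).length = g.length ∧
    (∀ row ∈ ps.foldl (fun lst kv => PySem.List.pySetD lst kv.1.1
        (PySem.List.pySetD (PySem.List.pyGetD lst kv.1.1 []) kv.1.2 kv.2)) g, row.length = L) ∧
    ∀ (x y : Nat), x < g.length → y < L →
      ((ps.foldl (fun lst kv => PySem.List.pySetD lst kv.1.1
          (PySem.List.pySetD (PySem.List.pyGetD lst kv.1.1 []) kv.1.2 kv.2)) g).getD x []).getD y 0 =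
        (((ps.find? (fun p => p.1 == ((x : Int), (y : Int)))).map Prod.snd).getD
          ((g.getD x []).getD y 0)) := by
  induction ps generalizing g with
  | nil => exact ⟨rfl, hrow, fun x y hx hy => rfl⟩
  | cons p ps ih =>
    obtain ⟨h1, h2, h3, h4⟩ := hin p (List.mem_cons_self ..)
    have hg : PySem.List.pyGetD g p.1.1 [] = g[p.1.1.toNat]'h2 :=
      PySem.List.pyGetD_eq_getElem g [] h1 (by omega)
    have hgrow : (PySem.List.pySetD (PySem.List.pyGetD g p.1.1 []) p.1.2 p.2) =
        (g[p.1.1.toNat]'h2).set p.1.2.toNat p.2 := by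
      rw [hg, PySem.List.pySetD_of_nonneg _ _ h3]
    have hstep : (PySem.List.pySetD g p.1.1
        (PySem.List.pySetD (PySem.List.pyGetD g p.1.1 []) p.1.2 p.2)) =
        g.set p.1.1.toNat ((g[p.1.1.toNat]'h2).set p.1.2.toNat p.2) := by
      rw [hgrow, PySem.List.pySetD_of_nonneg _ _ h1]
    rw [List.foldl_cons, hstep]
    set g' := g.set p.1.1.toNat ((g[p.1.1.toNat]'h2).set p.1.2.toNat p.2) with hg'
    have hlen' : g'.length = g.length := by rw [hg']; exact List.length_set
    have hrow' : ∀ row ∈ g', row.length = L := by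
      intro row hr
      rw [hg'] at hr
      rcases List.mem_or_eq_of_mem_set hr with h | h
      · exact hrow row h
      · rw [h, List.length_set]
        exact hrow _ (List.getElem_mem h2)
    have hin' : ∀ q ∈ ps, 0 ≤ q.1.1 ∧ q.1.1.toNat < g'.length ∧ 0 ≤ q.1.2 ∧ q.1.2.toNat < L := by
      intro q hq
      have h5 := hin q (List.mem_cons_of_mem _ hq)
      rw [hlen']
      exact h5
    obtain ⟨ihl, ihr, ihe⟩ := ih g' hrow' (List.Nodup.of_cons (by rwa [List.map_cons] at hnd)) hin'
    refine ⟨by rw [ihl, hlen'], ihr, ?_⟩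
    intro x y hx hy
    rw [ihe x y (by omega) hy]
    have hentry := pvSetEntry g L hrow p.1.1.toNat p.1.2.toNat p.2 h2 h4 x y hx hy
    rw [show g' = g.set p.1.1.toNat ((g[p.1.1.toNat]'h2).set p.1.2.toNat p.2) from rfl, hentry]
    by_cases hpk : p.1 = ((x : Int), (y : Int))
    · have hxx : p.1.1.toNat = x := by
        have : p.1.1 = (x : Int) := congrArg Prod.fst hpk
        omega
      have hyy : p.1.2.toNat = y := by
        have : p.1.2 = (y : Int) := congrArg Prod.snd hpk
        omega
      have hfind : ps.find? (fun q => q.1 == ((x : Int), (y : Int))) = none := by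
        rw [List.find?_eq_none]
        intro q hq hcon
        rw [List.map_cons] at hnd
        exact (List.nodup_cons.mp hnd).1 (by
          rw [hpk, ← (beq_iff_eq).mp hcon]
          exact List.mem_map_of_mem hq)
      rw [List.find?_cons_of_pos (by simp [hpk]), hfind, if_pos ⟨hxx, hyy⟩]
      rfl
    · have hne : ¬(p.1.1.toNat = x ∧ p.1.2.toNat = y) := by
        rintro ⟨e1, e2⟩
        apply hpk
        have f1 : p.1.1 = (x : Int) := by omega
        have f2 : p.1.2 = (y : Int) := by omega
        exact Prod.ext f1 f2
      rw [List.find?_cons_of_neg (by simp [hpk]), if_neg hne]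

theorem pvGetIdxEq (dic : PySem.Dict (Int × Int) Int) :
    pvA_getIdx dic = (dic.keys.map Prod.fst, dic.keys.map Prod.snd) := by
  rw [pvA_getIdx,
    PySem.List.foldl_prod_mk (f := fun a (k : Int × Int) => a ++ [k.1])
      (g := fun a (k : Int × Int) => a ++ [k.2]),
    PySem.List.foldl_append_singleton_eq_map, PySem.List.foldl_append_singleton_eq_map]
  rfl

theorem pvFinal (maps : PySem.Dict (Int × Int) Int)
    (hnd : maps.keys.Nodup) (hex : ∃ k ∈ maps.keys, 0 ≤ k.1 ∧ 0 ≤ k.2) :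
    (pvA_mapsToBoard2 (pvA_renewKeys maps
      ((if ((PySem.List.min? (pvA_getIdx maps).1 (fun y => y)).getD 0) < 0 then
          pvA_recalcIdx (pvA_getIdx maps).1
            ((((PySem.List.min? (pvA_getIdx maps).1 (fun y => y)).getD 0).natAbs : Int))
        else (pvA_getIdx maps).1).zip
       (if ((PySem.List.min? (pvA_getIdx maps).2 (fun y => y)).getD 0) < 0 then
          pvA_recalcIdx (pvA_getIdx maps).2
            ((((PySem.List.min? (pvA_getIdx maps).2 (fun y => y)).getD 0).natAbs : Int))
        else (pvA_getIdx maps).2)))) =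
    pvRender maps ((maps.keys.map Prod.fst).foldl min 0) ((maps.keys.map Prod.fst).foldl max 0)
      ((maps.keys.map Prod.snd).foldl min 0) ((maps.keys.map Prod.snd).foldl max 0) := by
  obtain ⟨kex, hkex, hkex1, hkex2⟩ := hex
  rcases hK : maps.keys with _ | ⟨k0, Kt⟩
  · rw [hK] at hkex; cases hkex
  rw [hK] at hkex hnd
  simp only [pvRender]
  rw [pvGetIdxEq, hK]
  rw [show List.map Prod.fst (k0 :: Kt) = k0.1 :: Kt.map Prod.fst from rfl,
      show List.map Prod.snd (k0 :: Kt) = k0.2 :: Kt.map Prod.snd from rfl]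
  rw [PySem.List.min?_id_cons, PySem.List.min?_id_cons]
  simp only [Option.getD_some]
  set RM := List.foldl min k0.1 (Kt.map Prod.fst) with hRM
  set CM := List.foldl min k0.2 (Kt.map Prod.snd) with hCM
  set RX := List.foldl max k0.1 (Kt.map Prod.fst) with hRX
  set CX := List.foldl max k0.2 (Kt.map Prod.snd) with hCX
  set sr : Int := if RM < 0 then ((RM.natAbs : Int)) else 0 with hsr
  set sc : Int := if CM < 0 then ((CM.natAbs : Int)) else 0 with hsc
  have hbd : ∀ k ∈ (k0 :: Kt), RM ≤ k.1 ∧ k.1 ≤ RX ∧ CM ≤ k.2 ∧ k.2 ≤ CX := by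
    intro k hk
    rcases List.mem_cons.mp hk with rfl | hk
    · exact ⟨(PySem.List.foldl_min_le _ _).1, (PySem.List.le_foldl_max _ _).1,
        (PySem.List.foldl_min_le _ _).1, (PySem.List.le_foldl_max _ _).1⟩
    · exact ⟨(PySem.List.foldl_min_le _ _).2 _ (List.mem_map_of_mem hk),
        (PySem.List.le_foldl_max _ _).2 _ (List.mem_map_of_mem hk),
        (PySem.List.foldl_min_le _ _).2 _ (List.mem_map_of_mem hk),
        (PySem.List.le_foldl_max _ _).2 _ (List.mem_map_of_mem hk)⟩
  have hRX0 : 0 ≤ RX := le_trans hkex1 (hbd kex hkex).2.1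
  have hCX0 : 0 ≤ CX := le_trans hkex2 (hbd kex hkex).2.2.2
  have hsr0 : 0 ≤ sr := by rw [hsr]; split <;> omega
  have hsc0 : 0 ≤ sc := by rw [hsc]; split <;> omega
  have hsrRM : RM + sr = max RM 0 := by rw [hsr]; split <;> omega
  have hscCM : CM + sc = max CM 0 := by rw [hsc]; split <;> omega
  have hrloeq : List.foldl min (0 : Int) (k0.1 :: Kt.map Prod.fst) = -sr := by
    rw [List.foldl_cons, List.foldl_assoc]
    rw [← hRM, hsr]; split <;> omega
  have hcloeq : List.foldl min (0 : Int) (k0.2 :: Kt.map Prod.snd) = -sc := by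
    rw [List.foldl_cons, List.foldl_assoc]
    rw [← hCM, hsc]; split <;> omega
  have hrhieq : List.foldl max (0 : Int) (k0.1 :: Kt.map Prod.fst) = RX := by
    rw [List.foldl_cons, List.foldl_assoc]
    rw [← hRX]; omega
  have hchieq : List.foldl max (0 : Int) (k0.2 :: Kt.map Prod.snd) = CX := by
    rw [List.foldl_cons, List.foldl_assoc]
    rw [← hCX]; omega
  rw [hrloeq, hcloeq, hrhieq, hchieq]
  -- shift the index lists
  have hridx : (if RM < 0 then
      pvA_recalcIdx (k0.1 :: Kt.map Prod.fst) ((RM.natAbs : Int))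
    else (k0.1 :: Kt.map Prod.fst)) = (k0.1 :: Kt.map Prod.fst).map (fun x => x + sr) := by
    rw [hsr]; by_cases hm : RM < 0
    · rw [if_pos hm, if_pos hm, pvRecalc]
    · rw [if_neg hm, if_neg hm]; simp
  have hcidx : (if CM < 0 then
      pvA_recalcIdx (k0.2 :: Kt.map Prod.snd) ((CM.natAbs : Int))
    else (k0.2 :: Kt.map Prod.snd)) = (k0.2 :: Kt.map Prod.snd).map (fun x => x + sc) := by
    rw [hsc]; by_cases hm : CM < 0
    · rw [if_pos hm, if_pos hm, pvRecalc]
    · rw [if_neg hm, if_neg hm]; simp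
  rw [hridx, hcidx]
  -- the renewed dict
  have hzip : (((k0.1 :: Kt.map Prod.fst)).map (fun x => x + sr)).zip
      (((k0.2 :: Kt.map Prod.snd)).map (fun x => x + sc)) =
      (k0 :: Kt).map (fun k => (k.1 + sr, k.2 + sc)) := by
    rw [show (k0.1 :: Kt.map Prod.fst) = (k0 :: Kt).map Prod.fst from rfl,
        show (k0.2 :: Kt.map Prod.snd) = (k0 :: Kt).map Prod.snd from rfl,
        List.map_map, List.map_map, List.zip_map']
    rfl
  have hvals : maps.values = (k0 :: Kt).map (fun k => maps.getD k 0) := by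
    rw [← hK]
    exact PySem.Dict.values_eq_map_keys maps (hK ▸ hnd) 0
  rw [hzip, pvA_renewKeys, hvals, List.zip_map']
  have hinj : Function.Injective (fun k : Int × Int => (k.1 + sr, k.2 + sc)) := by
    intro p q hpq
    simp only [Prod.mk.injEq] at hpq
    exact Prod.ext (by omega) (by omega)
  have hndm : ((k0 :: Kt).map (fun k => (k.1 + sr, k.2 + sc))).Nodup :=
    List.Nodup.map hinj hnd
  have hofl : PySem.Dict.ofList ((k0 :: Kt).map
      (fun k => ((k.1 + sr, k.2 + sc), maps.getD k 0))) =
      (k0 :: Kt).foldl (fun d k => d.insert (k.1 + sr, k.2 + sc) (maps.getD k 0))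
        PySem.Dict.empty := by
    rw [show PySem.Dict.ofList ((k0 :: Kt).map
        (fun k => ((k.1 + sr, k.2 + sc), maps.getD k 0))) =
      ((k0 :: Kt).map (fun k => ((k.1 + sr, k.2 + sc), maps.getD k 0))).foldl
        (fun d p => d.insert p.1 p.2) PySem.Dict.empty from rfl, List.foldl_map]
  rw [hofl]
  have hitems := PySem.Dict.items_foldl_insert_fresh (k0 :: Kt)
    (fun k => (k.1 + sr, k.2 + sc)) (fun k => maps.getD k 0) PySem.Dict.empty
    (fun _ _ => rfl) hndm
  simp only [show (PySem.Dict.empty : PySem.Dict (Int × Int) Int).items = [] from rfl,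
    List.nil_append] at hitems
  have hkeys' : ((k0 :: Kt).foldl (fun d k => d.insert (k.1 + sr, k.2 + sc) (maps.getD k 0))
      PySem.Dict.empty).keys = (k0 :: Kt).map (fun k => (k.1 + sr, k.2 + sc)) := by
    rw [show ∀ (dd : PySem.Dict (Int × Int) Int), dd.keys = dd.items.map Prod.fst from
      fun _ => rfl, hitems, List.map_map]
    rfl
  -- maps_to_board2
  rw [pvA_mapsToBoard2, pvGetIdxEq, hkeys', hitems]
  rw [show ((k0 :: Kt).map (fun k => (k.1 + sr, k.2 + sc))).map Prod.fst =
      (k0.1 + sr) :: ((Kt.map Prod.fst).map (fun x => x + sr)) from by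
    simp only [List.map_map]; rfl]
  rw [show ((k0 :: Kt).map (fun k => (k.1 + sr, k.2 + sc))).map Prod.snd =
      (k0.2 + sc) :: ((Kt.map Prod.snd).map (fun x => x + sc)) from by
    simp only [List.map_map]; rfl]
  rw [PySem.List.max?_id_cons, PySem.List.max?_id_cons]
  simp only [Option.getD_some]
  rw [pvFoldMaxShift, pvFoldMaxShift, ← hRX, ← hCX]
  -- the grid fold
  set L := (CX + sc + 1).toNat with hL
  set g0 := List.replicate (RX + sr + 1).toNat (List.replicate L (0 : Int)) with hg0
  have hrow0 : ∀ row ∈ g0, row.length = L := by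
    intro row hr
    rw [List.eq_of_mem_replicate hr, List.length_replicate]
  have hndfst : (((k0 :: Kt).map (fun k => ((k.1 + sr, k.2 + sc), maps.getD k 0))).map
      Prod.fst).Nodup := by
    rw [List.map_map]
    exact hndm
  have hbnds : ∀ p ∈ (k0 :: Kt).map (fun k => ((k.1 + sr, k.2 + sc), maps.getD k 0)),
      0 ≤ p.1.1 ∧ p.1.1.toNat < g0.length ∧ 0 ≤ p.1.2 ∧ p.1.2.toNat < L := by
    intro p hp
    obtain ⟨k, hk, rfl⟩ := List.mem_map.mp hp
    obtain ⟨b1, b2, b3, b4⟩ := hbd k hk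
    dsimp only
    rw [hg0, List.length_replicate, hL]
    refine ⟨by omega, by omega, by omega, by omega⟩
  obtain ⟨hRlen, hRrow, hRent⟩ := pvGridFold
    ((k0 :: Kt).map (fun k => ((k.1 + sr, k.2 + sc), maps.getD k 0))) g0 L hrow0 hndfst hbnds
  -- assemble
  apply List.ext_getElem
  · rw [hRlen, hg0, List.length_replicate, List.length_map, PySem.List.length_pyRange_one]
    omega
  · intro x hx1 hx2
    rw [List.getElem_map, PySem.List.getElem_pyRange_one _ _ _
      (by rwa [List.length_map] at hx2)]
    have hxlen : x < (RX + sr + 1).toNat := by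
      rw [hRlen, hg0, List.length_replicate] at hx1; exact hx1
    apply List.ext_getElem
    · rw [hRrow _ (List.getElem_mem hx1), List.length_map, PySem.List.length_pyRange_one, hL]
      omega
    · intro y hy1 hy2
      rw [List.getElem_map, PySem.List.getElem_pyRange_one _ _ _
        (by rwa [List.length_map] at hy2)]
      have hylen : y < L := by rw [hRrow _ (List.getElem_mem hx1)] at hy1; exact hy1
      rw [← List.getD_eq_getElem _ (0 : Int) hy1,
        ← List.getD_eq_getElem _ ([] : List Int) hx1]
      rw [hRent x y (by rwa [hRlen] at hx1) hylen]
      have hg0e : (g0.getD x []).getD y 0 = 0 := by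
        rw [hg0]
        rw [List.getD_eq_getElem (List.replicate (RX + sr + 1).toNat (List.replicate L 0))
          ([] : List Int) (by rw [List.length_replicate]; exact hxlen)]
        rw [List.getElem_replicate]
        rw [List.getD_eq_getElem (List.replicate L 0) (0 : Int)
          (by rw [List.length_replicate]; exact hylen)]
        rw [List.getElem_replicate]
      rw [hg0e]
      -- resolve the find?
      rw [List.find?_map]
      rw [show ((fun p : (Int × Int) × Int => p.1 == ((x : Int), (y : Int))) ∘
          (fun k : Int × Int => ((k.1 + sr, k.2 + sc), maps.getD k 0))) =
          (fun k : Int × Int => decide (k = ((x : Int) - sr, (y : Int) - sc))) from by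
        funext k
        simp only [Function.comp_apply]
        rw [Bool.eq_iff_iff]
        simp only [beq_iff_eq, decide_eq_true_eq, Prod.ext_iff]
        omega]
      rw [pvFindEq _ _ ((x : Int) - sr, (y : Int) - sc) (fun k => by simp)]
      have hcoord : (-sr + (x : Int), -sc + (y : Int)) = ((x : Int) - sr, (y : Int) - sc) := by
        exact Prod.ext (by omega) (by omega)
      rw [hcoord]
      by_cases hmem : ((x : Int) - sr, (y : Int) - sc) ∈ (k0 :: Kt)
      · rw [if_pos hmem]
        rfl
      · rw [if_neg hmem]
        have hnone : maps.get? ((x : Int) - sr, (y : Int) - sc) = none :=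
          (PySem.Dict.get?_eq_none_iff_not_mem_keys _ _).mpr (by rw [hK]; exact hmem)
        rw [PySem.Dict.getD_eq_get?_getD, hnone]
        rfl



theorem pvFoldMaxUB (l : List Int) (a M : Int) (haM : a ≤ M) (h : ∀ x ∈ l, x ≤ M) :
    l.foldl max a ≤ M := by
  induction l generalizing a with
  | nil => exact haM
  | cons x xs ih =>
    exact ih _ (max_le haM (h x (by simp))) (fun y hy => h y (by simp [hy]))

theorem pvFoldMaxEq (l : List Int) (a M : Int) (hmem : M ∈ l) (hub : ∀ x ∈ l, x ≤ M) :
    l.foldl max a = max a M := by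
  refine le_antisymm (pvFoldMaxUB l a (max a M) (le_max_left _ _)
    (fun x hx => le_trans (hub x hx) (le_max_right _ _))) ?_
  exact max_le (PySem.List.le_foldl_max l a).1 ((PySem.List.le_foldl_max l a).2 _ hmem)

theorem pvFoldMaxInit (l : List Int) (a b : Int) (hab : a ≤ b)
    (hx : ∃ x ∈ l, b ≤ x) : l.foldl max a = l.foldl max b := by
  obtain ⟨x, hmem, hbx⟩ := hx
  have h1 : l.foldl max b = max b (l.foldl max a) := by
    have h2 : l.foldl max (max b a) = max b (l.foldl max a) := List.foldl_assoc
    rwa [max_eq_left hab] at h2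
  rw [h1, max_eq_right (le_trans hbx ((PySem.List.le_foldl_max l a).2 _ hmem))]

theorem pvRenderLen (m : PySem.Dict (Int × Int) Int) (rlo rhi clo chi : Int) :
    (pvRender m rlo rhi clo chi).length = (rhi + 1 - rlo).toNat := by
  rw [pvRender, List.length_map, PySem.List.length_pyRange_one]

theorem pvRenderRow (m : PySem.Dict (Int × Int) Int) (rlo rhi clo chi i : Int)
    (h1 : rlo ≤ i) (h2 : i ≤ rhi) :
    PySem.List.pyGetD (pvRender m rlo rhi clo chi) (i - rlo) [] =
      (PySem.List.pyRange clo (chi + 1) 1).map (fun j => m.getD (i, j) 0) := by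
  rw [PySem.List.pyGetD_eq_getElem _ _ (by omega)
    (by rw [pvRenderLen]; omega)]
  simp only [pvRender, List.getElem_map]
  rw [PySem.List.getElem_pyRange_one]
  have hc : rlo + (((i - rlo).toNat : Nat) : Int) = i := by omega
  rw [hc]

theorem pvRenderGet (m : PySem.Dict (Int × Int) Int) (rlo rhi clo chi i j : Int)
    (h1 : rlo ≤ i) (h2 : i ≤ rhi) (h3 : clo ≤ j) (h4 : j ≤ chi) :
    PySem.List.pyGetD (PySem.List.pyGetD (pvRender m rlo rhi clo chi) (i - rlo) [])
      (j - clo) 0 = m.getD (i, j) 0 := by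
  rw [pvRenderRow m rlo rhi clo chi i h1 h2]
  rw [PySem.List.pyGetD_eq_getElem _ _ (by omega)
    (by rw [List.length_map, PySem.List.length_pyRange_one]; omega)]
  rw [List.getElem_map, PySem.List.getElem_pyRange_one]
  have hc : clo + (((j - clo).toNat : Nat) : Int) = j := by omega
  rw [hc]

theorem pvRenderRowLen (m : PySem.Dict (Int × Int) Int) (rlo rhi clo chi : Int)
    (x : Nat) (hx : x < (pvRender m rlo rhi clo chi).length) :
    ((pvRender m rlo rhi clo chi)[x]'hx).length = (chi + 1 - clo).toNat := by
  simp only [pvRender, List.getElem_map, List.length_map, PySem.List.length_pyRange_one]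

theorem pvRenderEntry (m : PySem.Dict (Int × Int) Int) (rlo rhi clo chi : Int)
    (x y : Nat) (hx : x < (pvRender m rlo rhi clo chi).length)
    (hy : y < ((pvRender m rlo rhi clo chi)[x]'hx).length) :
    (((pvRender m rlo rhi clo chi)[x]'hx)[y]'hy) =
      m.getD (rlo + (x : Int), clo + (y : Int)) 0 := by
  simp only [pvRender, List.getElem_map, PySem.List.getElem_pyRange_one]

theorem pvRenderExt (m : PySem.Dict (Int × Int) Int) (rlo rhi clo chi : Int)
    (g : List (List Int))
    (hlen : g.length = (rhi + 1 - rlo).toNat)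
    (hrowlen : ∀ (x : Nat) (hx : x < g.length), (g[x]'hx).length = (chi + 1 - clo).toNat)
    (hval : ∀ (x y : Nat), x < (rhi + 1 - rlo).toNat → y < (chi + 1 - clo).toNat →
      (g.getD x []).getD y 0 = m.getD (rlo + (x : Int), clo + (y : Int)) 0) :
    g = pvRender m rlo rhi clo chi := by
  apply List.ext_getElem
  · rw [hlen, pvRenderLen]
  · intro x hx1 hx2
    apply List.ext_getElem
    · rw [hrowlen x hx1, pvRenderRowLen]
    · intro y hy1 hy2
      have e1 : (g[x]'hx1)[y]'hy1 = (g.getD x []).getD y 0 := by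
        rw [List.getD_eq_getElem _ _ hx1, List.getD_eq_getElem _ _ hy1]
      rw [e1, hval x y (by rwa [hlen] at hx1) (by rw [hrowlen x hx1] at hy1; exact hy1),
        pvRenderEntry]

theorem pvRenderSet (m : PySem.Dict (Int × Int) Int) (rlo rhi clo chi i j : Int) (v : Int)
    (h1 : rlo ≤ i) (h2 : i ≤ rhi) (h3 : clo ≤ j) (h4 : j ≤ chi) :
    PySem.List.pySetD (pvRender m rlo rhi clo chi) (i - rlo)
      (PySem.List.pySetD (PySem.List.pyGetD (pvRender m rlo rhi clo chi) (i - rlo) [])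
        (j - clo) v) =
    pvRender (m.insert (i, j) v) rlo rhi clo chi := by
  rw [PySem.List.pySetD_of_nonneg _ _ (by omega : (0 : Int) ≤ j - clo),
    PySem.List.pySetD_of_nonneg _ _ (by omega : (0 : Int) ≤ i - rlo)]
  have hrlen : (pvRender m rlo rhi clo chi).length = (rhi + 1 - rlo).toNat :=
    pvRenderLen m rlo rhi clo chi
  have hxlt : (i - rlo).toNat < (pvRender m rlo rhi clo chi).length := by
    rw [hrlen]; omega
  have hrowget : PySem.List.pyGetD (pvRender m rlo rhi clo chi) (i - rlo) [] =
      (pvRender m rlo rhi clo chi)[(i - rlo).toNat]'hxlt :=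
    PySem.List.pyGetD_eq_getElem _ _ (by omega) (by omega)
  rw [hrowget]
  have hrowsmem : ∀ row ∈ pvRender m rlo rhi clo chi, row.length = (chi + 1 - clo).toNat := by
    intro row hr
    obtain ⟨k, hk, rfl⟩ := List.mem_iff_getElem.mp hr
    exact pvRenderRowLen m rlo rhi clo chi k hk
  have hylt : (j - clo).toNat < (chi + 1 - clo).toNat := by omega
  apply pvRenderExt
  · rw [List.length_set, hrlen]
  · intro x hx
    rw [List.getElem_set]
    split
    · rw [List.length_set, pvRenderRowLen]
    · rw [pvRenderRowLen]
  · intro x y hx hy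
    rw [pvSetEntry (pvRender m rlo rhi clo chi) (chi + 1 - clo).toNat hrowsmem
      (i - rlo).toNat (j - clo).toNat v hxlt hylt x y (by omega) hy]
    split
    · next hxy =>
      obtain ⟨e1, e2⟩ := hxy
      rw [PySem.Dict.getD_insert, if_pos (by
        apply Prod.ext <;> simp only [] <;> omega)]
    · next hxy =>
      have hgd : ((pvRender m rlo rhi clo chi).getD x []).getD y 0 =
          m.getD (rlo + (x : Int), clo + (y : Int)) 0 := by
        have hx' : x < (pvRender m rlo rhi clo chi).length := by rw [hrlen]; omega
        have hy' : y < ((pvRender m rlo rhi clo chi)[x]'hx').length := by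
          rw [pvRenderRowLen]; exact hy
        rw [List.getD_eq_getElem _ _ hx', List.getD_eq_getElem _ _ hy', pvRenderEntry]
      rw [hgd, PySem.Dict.getD_insert, if_neg (by
        intro hcon
        have e1 : rlo + (x : Int) = i := congrArg Prod.fst hcon
        have e2 : clo + (y : Int) = j := congrArg Prod.snd hcon
        omega)]

theorem pvRenderCongr (m m' : PySem.Dict (Int × Int) Int) (rlo rhi clo chi : Int)
    (h : ∀ q, m.getD q 0 = m'.getD q 0) :
    pvRender m rlo rhi clo chi = pvRender m' rlo rhi clo chi := by
  simp only [pvRender, h]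

theorem pvRenderConsRow (m : PySem.Dict (Int × Int) Int) (rlo rhi clo chi : Int)
    (h : rlo ≤ rhi + 1) (hz : ∀ j, m.getD (rlo - 1, j) 0 = 0) :
    pvRender m (rlo - 1) rhi clo chi =
      List.replicate (chi + 1 - clo).toNat (0 : Int) :: pvRender m rlo rhi clo chi := by
  have hcons : PySem.List.pyRange (rlo - 1) (rhi + 1) 1 =
      (rlo - 1) :: PySem.List.pyRange rlo (rhi + 1) 1 := by
    rw [PySem.List.pyRange_one_cons (by omega)]
    rw [show rlo - 1 + 1 = rlo from by ring]
  simp only [pvRender]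
  rw [hcons, List.map_cons]
  congr 1
  rw [show (fun j => m.getD (rlo - 1, j) 0) = (fun _ : Int => (0 : Int)) from funext hz,
    List.map_const', PySem.List.length_pyRange_one]

theorem pvRenderSnocRow (m : PySem.Dict (Int × Int) Int) (rlo rhi clo chi : Int)
    (h : rlo ≤ rhi + 1) (hz : ∀ j, m.getD (rhi + 1, j) 0 = 0) :
    pvRender m rlo (rhi + 1) clo chi =
      pvRender m rlo rhi clo chi ++ [List.replicate (chi + 1 - clo).toNat (0 : Int)] := by
  simp only [pvRender]
  rw [PySem.List.pyRange_one_succ_right (by omega : rlo ≤ rhi + 1), List.map_append,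
    List.map_singleton]
  congr 2
  rw [show (fun j => m.getD (rhi + 1, j) 0) = (fun _ : Int => (0 : Int)) from funext hz,
    List.map_const', PySem.List.length_pyRange_one]

theorem pvRenderConsCol (m : PySem.Dict (Int × Int) Int) (rlo rhi clo chi : Int)
    (h : clo ≤ chi + 1) (hz : ∀ i, m.getD (i, clo - 1) 0 = 0) :
    pvRender m rlo rhi (clo - 1) chi =
      (pvRender m rlo rhi clo chi).map (fun row => (0 : Int) :: row) := by
  simp only [pvRender, List.map_map]
  apply List.map_congr_left
  intro i _
  simp only [Function.comp_apply]
  rw [PySem.List.pyRange_one_cons (by omega : clo - 1 < chi + 1), List.map_cons, hz i,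
    show clo - 1 + 1 = clo from by ring]

theorem pvRenderSnocCol (m : PySem.Dict (Int × Int) Int) (rlo rhi clo chi : Int)
    (h : clo ≤ chi + 1) (hz : ∀ i, m.getD (i, chi + 1) 0 = 0) :
    pvRender m rlo rhi clo (chi + 1) =
      (pvRender m rlo rhi clo chi).map (fun row => row ++ [0]) := by
  simp only [pvRender, List.map_map]
  apply List.map_congr_left
  intro i _
  simp only [Function.comp_apply]
  rw [PySem.List.pyRange_one_succ_right (by omega : clo ≤ chi + 1), List.map_append,
    List.map_singleton, hz i]

theorem pvRenderRow0Len (m : PySem.Dict (Int × Int) Int) (rlo rhi clo chi : Int)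
    (h : rlo ≤ rhi) :
    (PySem.List.pyGetD (pvRender m rlo rhi clo chi) 0 []).length =
      (chi + 1 - clo).toNat := by
  have := pvRenderRow m rlo rhi clo chi rlo (le_refl _) h
  rw [sub_self] at this
  rw [this, List.length_map, PySem.List.length_pyRange_one]

theorem pvVecDRDC (d : Int) (h : d = 0 ∨ d = 1 ∨ d = 2 ∨ d = 3) :
    (PySem.List.pyGetD (pvCyc d) 0 ((0 : Int), (0 : Int))).1 =
      PySem.List.pyGetD [(-1 : Int), 0, 1, 0] d 0 ∧
    (PySem.List.pyGetD (pvCyc d) 0 ((0 : Int), (0 : Int))).2 =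
      PySem.List.pyGetD [(0 : Int), -1, 0, 1] d 0 := by
  rcases h with h | h | h | h <;> subst h <;> exact ⟨by decide, by decide⟩

theorem pvVecCases (d : Int) (h : d = 0 ∨ d = 1 ∨ d = 2 ∨ d = 3) :
    PySem.List.pyGetD (pvCyc d) 0 ((0 : Int), (0 : Int)) = (-1, 0) ∨
    PySem.List.pyGetD (pvCyc d) 0 ((0 : Int), (0 : Int)) = (0, -1) ∨
    PySem.List.pyGetD (pvCyc d) 0 ((0 : Int), (0 : Int)) = (1, 0) ∨
    PySem.List.pyGetD (pvCyc d) 0 ((0 : Int), (0 : Int)) = (0, 1) := by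
  rcases h with h | h | h | h <;> subst h
  · exact Or.inl (by decide)
  · exact Or.inr (Or.inl (by decide))
  · exact Or.inr (Or.inr (Or.inl (by decide)))
  · exact Or.inr (Or.inr (Or.inr (by decide)))

theorem pvGetDInsertZero (m : PySem.Dict (Int × Int) Int) (p : Int × Int)
    (h : m.contains p = false) (q : Int × Int) :
    (m.insert p 0).getD q 0 = m.getD q 0 := by
  rw [PySem.Dict.getD_insert]
  split
  · next hq =>
    subst hq
    exact (PySem.Dict.getD_of_not_contains m 0 h).symm
  · rfl

theorem pvGrowRow (m1 : PySem.Dict (Int × Int) Int) (rlo rhi clo chi r' : Int)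
    (h1 : rlo ≤ 0) (h2 : 0 ≤ rhi) (h3 : clo ≤ 0) (h4 : 0 ≤ chi)
    (hr1 : rlo - 1 ≤ r') (hr2 : r' ≤ rhi + 1)
    (hz : ∀ i j : Int, i < rlo ∨ rhi < i → m1.getD (i, j) 0 = 0) :
    (if r' - rlo < 0 then
      (List.replicate (PySem.List.pyGetD (pvRender m1 rlo rhi clo chi) 0 []).length (0 : Int)
        :: pvRender m1 rlo rhi clo chi, (0 : Int))
    else if r' - rlo = ((pvRender m1 rlo rhi clo chi).length : Int) then
      (pvRender m1 rlo rhi clo chi ++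
        [List.replicate (PySem.List.pyGetD (pvRender m1 rlo rhi clo chi) 0 []).length (0 : Int)],
       r' - rlo)
    else (pvRender m1 rlo rhi clo chi, r' - rlo))
    = (pvRender m1 (min rlo r') (max rhi r') clo chi, r' - min rlo r') := by
  have hlen : ((pvRender m1 rlo rhi clo chi).length : Int) = rhi + 1 - rlo := by
    rw [pvRenderLen]; omega
  have hw : (PySem.List.pyGetD (pvRender m1 rlo rhi clo chi) 0 []).length =
      (chi + 1 - clo).toNat := pvRenderRow0Len m1 rlo rhi clo chi (by omega)
  by_cases hlow : r' < rlo
  · have hr' : r' = rlo - 1 := by omega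
    rw [if_pos (by omega), hw]
    subst hr'
    rw [min_eq_right (by omega), max_eq_left (by omega)]
    rw [pvRenderConsRow m1 rlo rhi clo chi (by omega) (fun j => hz _ j (Or.inl (by omega)))]
    simp
  · by_cases hhigh : r' = rhi + 1
    · rw [if_neg (by omega), if_pos (by omega), hw]
      subst hhigh
      rw [min_eq_left (by omega), max_eq_right (by omega)]
      rw [pvRenderSnocRow m1 rlo rhi clo chi (by omega) (fun j => hz _ j (Or.inr (by omega)))]
    · rw [if_neg (by omega), if_neg (by omega)]
      rw [min_eq_left (by omega), max_eq_left (by omega)]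

theorem pvGrowCol (m1 : PySem.Dict (Int × Int) Int) (rlo rhi clo chi c' : Int)
    (h1 : rlo ≤ rhi) (_h3 : clo ≤ 0) (_h4 : 0 ≤ chi)
    (hc1 : clo - 1 ≤ c') (hc2 : c' ≤ chi + 1)
    (hz : ∀ i j : Int, j < clo ∨ chi < j → m1.getD (i, j) 0 = 0) :
    (if c' - clo < 0 then
      ((pvRender m1 rlo rhi clo chi).map (fun row => (0 : Int) :: row), (0 : Int))
    else if c' - clo =
        ((PySem.List.pyGetD (pvRender m1 rlo rhi clo chi) 0 []).length : Int) then
      ((pvRender m1 rlo rhi clo chi).map (fun row => row ++ [0]), c' - clo)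
    else (pvRender m1 rlo rhi clo chi, c' - clo))
    = (pvRender m1 rlo rhi (min clo c') (max chi c'), c' - min clo c') := by
  have hw : (PySem.List.pyGetD (pvRender m1 rlo rhi clo chi) 0 []).length =
      (chi + 1 - clo).toNat := pvRenderRow0Len m1 rlo rhi clo chi h1
  by_cases hlow : c' < clo
  · have hc' : c' = clo - 1 := by omega
    rw [if_pos (by omega)]
    subst hc'
    rw [min_eq_right (by omega), max_eq_left (by omega)]
    rw [pvRenderConsCol m1 rlo rhi clo chi (by omega) (fun i => hz i _ (Or.inl (by omega)))]
    simp
  · by_cases hhigh : c' = chi + 1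
    · rw [if_neg (by omega), if_pos (by rw [hw]; omega)]
      subst hhigh
      rw [min_eq_left (by omega), max_eq_right (by omega)]
      rw [pvRenderSnocCol m1 rlo rhi clo chi (by omega) (fun i => hz i _ (Or.inr (by omega)))]
    · rw [if_neg (by omega), if_neg (by rw [hw]; omega)]
      rw [min_eq_left (by omega), max_eq_left (by omega)]

set_option maxHeartbeats 2000000 in
theorem pvStep (a : PySem.Dict (Int × Int) Int × Int × Int × List (Int × Int))
    (b : List (List Int) × Int × Int × Int) (h : pvInv a b) :
    pvInv (pvStepA a) (pvStepB b) := by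
  obtain ⟨⟨hnd, hex, hr, hc, hd4, hcyc, hgrid⟩, hcont⟩ := h
  obtain ⟨maps, r, c, inc⟩ := a
  obtain ⟨grid, rg, cg, d⟩ := b
  simp only at hnd hex hr hc hd4 hcyc hgrid hcont
  subst hcyc
  subst hgrid
  set rlo := (maps.keys.map Prod.fst).foldl min 0 with hrlo
  set rhi := (maps.keys.map Prod.fst).foldl max 0 with hrhi
  set clo := (maps.keys.map Prod.snd).foldl min 0 with hclo
  set chi := (maps.keys.map Prod.snd).foldl max 0 with hchi
  have hrg : rg = r - rlo := by omega
  have hcg : cg = c - clo := by omega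
  subst hrg
  subst hcg
  have hmemk : (r, c) ∈ maps.keys :=
    (PySem.Dict.contains_iff_mem_keys (d := maps) (k := (r, c))).mp hcont
  have hbd : ∀ k ∈ maps.keys, rlo ≤ k.1 ∧ k.1 ≤ rhi ∧ clo ≤ k.2 ∧ k.2 ≤ chi := by
    intro k hk
    exact ⟨(PySem.List.foldl_min_le _ _).2 _ (List.mem_map_of_mem hk),
      (PySem.List.le_foldl_max _ _).2 _ (List.mem_map_of_mem hk),
      (PySem.List.foldl_min_le _ _).2 _ (List.mem_map_of_mem hk),
      (PySem.List.le_foldl_max _ _).2 _ (List.mem_map_of_mem hk)⟩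
  obtain ⟨hrb1, hrb2, hrb3, hrb4⟩ := hbd _ hmemk
  have h10 : rlo ≤ 0 := (PySem.List.foldl_min_le (maps.keys.map Prod.fst) 0).1
  have h20 : 0 ≤ rhi := (PySem.List.le_foldl_max (maps.keys.map Prod.fst) 0).1
  have h30 : clo ≤ 0 := (PySem.List.foldl_min_le (maps.keys.map Prod.snd) 0).1
  have h40 : 0 ≤ chi := (PySem.List.le_foldl_max (maps.keys.map Prod.snd) 0).1
  simp only [pvStepA, pvStepB]
  set val := maps.getD (r, c) 0 with hvaldef
  have hvalB : PySem.List.pyGetD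
      (PySem.List.pyGetD (pvRender maps rlo rhi clo chi) (r - rlo) []) (c - clo) 0 = val :=
    pvRenderGet maps rlo rhi clo chi r c hrb1 hrb2 hrb3 hrb4
  rw [hvalB]
  have hwB : (if val ≠ 0 then (0 : Int) else 1) = (if val = 0 then (1 : Int) else 0) := by
    by_cases h0 : val = 0 <;> simp [h0]
  rw [hwB]
  rw [pvRenderSet maps rlo rhi clo chi r c _ hrb1 hrb2 hrb3 hrb4]
  set w : Int := if val = 0 then (1 : Int) else 0 with hwdef
  set m1 := maps.insert (r, c) w with hm1def
  have hrot : (if val = 1 then pvA_rot1 (pvCyc d) else pvA_rotNeg1 (pvCyc d)) =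
      pvCyc (if val = 1 then PySem.Int.mod (d - 1) 4 else PySem.Int.mod (d + 1) 4) := by
    by_cases h1 : val = 1 <;> simp only [h1, ite_true, ite_false]
    · exact (pvRotR d hd4).1
    · exact (pvRotL d hd4).1
  rw [hrot]
  set d' := if val = 1 then PySem.Int.mod (d - 1) 4 else PySem.Int.mod (d + 1) 4 with hd'def
  have hd'4 : d' = 0 ∨ d' = 1 ∨ d' = 2 ∨ d' = 3 := by
    rw [hd'def]; by_cases h1 : val = 1 <;> simp only [h1, ite_true, ite_false]
    · exact (pvRotR d hd4).2
    · exact (pvRotL d hd4).2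
  set vec := PySem.List.pyGetD (pvCyc d') 0 ((0 : Int), (0 : Int)) with hvecdef
  have hDR : PySem.List.pyGetD [(-1 : Int), 0, 1, 0] d' 0 = vec.1 := (pvVecDRDC d' hd'4).1.symm
  have hDC : PySem.List.pyGetD [(0 : Int), -1, 0, 1] d' 0 = vec.2 := (pvVecDRDC d' hd'4).2.symm
  rw [hDR, hDC]
  have er : r - rlo + vec.1 = r + vec.1 - rlo := by ring
  have ec : c - clo + vec.2 = c + vec.2 - clo := by ring
  rw [er, ec]
  set r' := r + vec.1 with hr'def
  set c' := c + vec.2 with hc'def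
  have hk1 : m1.keys = maps.keys := PySem.Dict.keys_insert_of_contains maps w hcont
  have hnd1 : m1.keys.Nodup := by rw [hk1]; exact hnd
  have hvcomp : (vec.1 = -1 ∧ vec.2 = 0) ∨ (vec.1 = 0 ∧ vec.2 = -1) ∨
      (vec.1 = 1 ∧ vec.2 = 0) ∨ (vec.1 = 0 ∧ vec.2 = 1) := by
    have hvc := pvVecCases d' hd'4
    rcases hvc with h | h | h | h <;>
      rw [show vec = PySem.List.pyGetD (pvCyc d') 0 ((0 : Int), (0 : Int)) from hvecdef, h]
    · exact Or.inl ⟨rfl, rfl⟩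
    · exact Or.inr (Or.inl ⟨rfl, rfl⟩)
    · exact Or.inr (Or.inr (Or.inl ⟨rfl, rfl⟩))
    · exact Or.inr (Or.inr (Or.inr ⟨rfl, rfl⟩))
  have hr'1 : rlo - 1 ≤ r' := by rcases hvcomp with ⟨e1, e2⟩ | ⟨e1, e2⟩ | ⟨e1, e2⟩ | ⟨e1, e2⟩ <;> omega
  have hr'2 : r' ≤ rhi + 1 := by rcases hvcomp with ⟨e1, e2⟩ | ⟨e1, e2⟩ | ⟨e1, e2⟩ | ⟨e1, e2⟩ <;> omega
  have hc'1 : clo - 1 ≤ c' := by rcases hvcomp with ⟨e1, e2⟩ | ⟨e1, e2⟩ | ⟨e1, e2⟩ | ⟨e1, e2⟩ <;> omega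
  have hc'2 : c' ≤ chi + 1 := by rcases hvcomp with ⟨e1, e2⟩ | ⟨e1, e2⟩ | ⟨e1, e2⟩ | ⟨e1, e2⟩ <;> omega
  have hz1 : ∀ i j : Int, (i < rlo ∨ rhi < i ∨ j < clo ∨ chi < j) → m1.getD (i, j) 0 = 0 := by
    intro i j hij
    have hnk : (i, j) ∉ m1.keys := by
      rw [hk1]
      intro hmem
      obtain ⟨e1, e2, e3, e4⟩ := hbd _ hmem
      simp only at e1 e2 e3 e4
      omega
    have hcf : m1.contains (i, j) = false := by
      cases hcb : m1.contains (i, j)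
      · rfl
      · exact absurd ((PySem.Dict.contains_iff_mem_keys (d := m1) (k := (i, j))).mp hcb) hnk
    exact PySem.Dict.getD_of_not_contains m1 0 hcf
  rw [pvGrowRow m1 rlo rhi clo chi r' h10 h20 h30 h40 hr'1 hr'2
    (fun i j hij => hz1 i j (by tauto))]
  simp only
  rw [pvGrowCol m1 (min rlo r') (max rhi r') clo chi c'
    (le_trans (le_trans (min_le_left _ _) (le_trans h10 h20)) (le_max_left _ _))
    h30 h40 hc'1 hc'2 (fun i j hij => hz1 i j (by tauto))]
  simp only
  by_cases hctn : m1.contains (r', c') = true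
  · rw [if_pos hctn]
    have hmem1 : (r', c') ∈ maps.keys := by
      rw [← hk1]
      exact (PySem.Dict.contains_iff_mem_keys (d := m1) (k := (r', c'))).mp hctn
    obtain ⟨f1, f2, f3, f4⟩ := hbd _ hmem1
    simp only at f1 f2 f3 f4
    rw [min_eq_left f1, max_eq_left f2, min_eq_left f3, max_eq_left f4]
    refine ⟨⟨hnd1, ?_, ?_, ?_, hd'4, rfl, ?_⟩, hctn⟩
    · obtain ⟨k0, hk0, hk0p⟩ := hex
      exact ⟨k0, by rw [hk1]; exact hk0, hk0p⟩
    · simp only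
      rw [hk1]
      omega
    · simp only
      rw [hk1]
      omega
    · simp only
      rw [hk1]
  · have hcf : m1.contains (r', c') = false := by
      cases hcb : m1.contains (r', c')
      · rfl
      · exact absurd hcb hctn
    rw [if_neg hctn]
    have hk2 : (m1.insert (r', c') 0).keys = m1.keys ++ [(r', c')] :=
      PySem.Dict.keys_insert_of_not_contains _ _ hcf
    have hnd2 : (m1.insert (r', c') 0).keys.Nodup := PySem.Dict.nodup_keys_insert _ _ _ hnd1
    have hf1 : ((m1.insert (r', c') 0).keys.map Prod.fst).foldl min 0 = min rlo r' := by
      rw [hk2, List.map_append, List.foldl_append, hk1]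
      rfl
    have hf2 : ((m1.insert (r', c') 0).keys.map Prod.fst).foldl max 0 = max rhi r' := by
      rw [hk2, List.map_append, List.foldl_append, hk1]
      rfl
    have hf3 : ((m1.insert (r', c') 0).keys.map Prod.snd).foldl min 0 = min clo c' := by
      rw [hk2, List.map_append, List.foldl_append, hk1]
      rfl
    have hf4 : ((m1.insert (r', c') 0).keys.map Prod.snd).foldl max 0 = max chi c' := by
      rw [hk2, List.map_append, List.foldl_append, hk1]
      rfl
    have hgd : ∀ q, (m1.insert (r', c') 0).getD q 0 = m1.getD q 0 :=
      pvGetDInsertZero m1 _ hcf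
    refine ⟨⟨hnd2, ?_, ?_, ?_, hd'4, rfl, ?_⟩, PySem.Dict.contains_insert_self _ _ _⟩
    · obtain ⟨k0, hk0, hk0p⟩ := hex
      refine ⟨k0, ?_, hk0p⟩
      rw [hk2]
      exact List.mem_append_left _ (by rw [hk1]; exact hk0)
    · simp only
      rw [hf1]
      omega
    · simp only
      rw [hf3]
      omega
    · simp only
      rw [hf1, hf2, hf3, hf4]
      exact pvRenderCongr _ _ _ _ _ _ (fun q => (hgd q).symm)

theorem pvIter (a : PySem.Dict (Int × Int) Int × Int × Int × List (Int × Int))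
    (b : List (List Int) × Int × Int × Int) (h : pvInv a b) (m : Nat) :
    pvInv (pvStepA^[m] a) (pvStepB^[m] b) := by
  induction m with
  | zero => exact h
  | succ k ih =>
    rw [Function.iterate_succ_apply', Function.iterate_succ_apply']
    exact pvStep _ _ ih


theorem pvRowKeysNodup (row : List Int) (i : Int) :
    ((PySem.List.enumerate row 0).map (fun jv => (i, jv.1))).Nodup := by
  have h1 : (PySem.List.enumerate row 0).map (fun jv => (i, jv.1)) =
      ((PySem.List.enumerate row 0).map (fun jv => jv.1)).map (fun j => (i, j)) := by
    rw [List.map_map]; rfl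
  rw [h1]
  refine List.Nodup.map (fun a b hab => congrArg Prod.snd hab) ?_
  have := PySem.List.map_fst_enumerate row 0
  rw [show (fun (x : Int × Int) => x.1) = (Prod.fst : Int × Int → Int) from rfl] at this
  rw [show (fun (jv : Int × Int) => jv.1) = (Prod.fst : Int × Int → Int) from rfl, this]
  exact PySem.List.nodup_pyRange_one _ _

theorem pvKVfst (rows : List (List Int)) (s : Int) :
    (pvKVList rows s).map Prod.fst = pvKeyList rows s := by
  simp only [pvKVList, pvKeyList, List.map_flatMap, List.map_map]
  rfl

theorem pvItemsOuter (rows : List (List Int)) (s : Int) (d : PySem.Dict (Int × Int) Int)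
    (hlt : ∀ k ∈ d.keys, k.1 < s) :
    ((PySem.List.enumerate rows s).foldl
      (fun dic iRow => (PySem.List.enumerate iRow.2).foldl
        (fun dic jEl => dic.insert (iRow.1, jEl.1) jEl.2) dic) d).items =
    d.items ++ pvKVList rows s := by
  induction rows generalizing s d with
  | nil => simp [pvKVList, PySem.List.enumerate]
  | cons x xs ih =>
    simp only [PySem.List.enumerate_cons, List.foldl_cons]
    have hfresh : ∀ a ∈ PySem.List.enumerate x 0, d.contains ((s : Int), a.1) = false := by
      intro a _
      cases hcb : d.contains (s, a.1)
      · rfl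
      · have h2 := hlt _ ((PySem.Dict.contains_iff_mem_keys (d := d) (k := (s, a.1))).mp hcb)
        simp only at h2
        omega
    have hinner := PySem.Dict.items_foldl_insert_fresh (PySem.List.enumerate x 0)
      (fun jEl => ((s : Int), jEl.1)) (fun jEl => jEl.2) d hfresh (pvRowKeysNodup x s)
    have hkeys' : ((PySem.List.enumerate x 0).foldl
        (fun dic jEl => dic.insert ((s : Int), jEl.1) jEl.2) d).keys =
        d.keys ++ (PySem.List.enumerate x 0).map (fun jv => ((s : Int), jv.1)) := by
      rw [show ∀ (dd : PySem.Dict (Int × Int) Int), dd.keys = dd.items.map Prod.fst from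
        fun _ => rfl, hinner, List.map_append, List.map_map]
      rfl
    rw [ih (s + 1) _ (by
      intro k hk
      rw [hkeys'] at hk
      rcases List.mem_append.mp hk with hk | hk
      · exact lt_trans (hlt _ hk) (by omega)
      · obtain ⟨jv, _, rfl⟩ := List.mem_map.mp hk
        simp only
        omega)]
    rw [hinner]
    simp only [pvKVList, PySem.List.enumerate_cons, List.flatMap_cons, List.append_assoc]

theorem pvKeyList_char (rows : List (List Int)) (s : Int) (p : Int × Int) :
    p ∈ pvKeyList rows s ↔ ∃ (k : Nat) (hk : k < rows.length) (m : Nat),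
      m < (rows[k]'hk).length ∧ p = (s + (k : Int), (m : Int)) := by
  simp only [pvKeyList, List.mem_flatMap]
  constructor
  · rintro ⟨iRow, hi, hp⟩
    obtain ⟨k, hk, rfl⟩ := (PySem.List.mem_enumerate_iff rows s iRow).mp hi
    simp only [List.mem_map] at hp
    obtain ⟨jv, hj, rfl⟩ := hp
    obtain ⟨m, hm, rfl⟩ := (PySem.List.mem_enumerate_iff _ 0 jv).mp hj
    exact ⟨k, hk, m, hm, by simp⟩
  · rintro ⟨k, hk, m, hm, rfl⟩
    refine ⟨(s + (k : Int), rows[k]'hk),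
      (PySem.List.mem_enumerate_iff rows s _).mpr ⟨k, hk, rfl⟩, ?_⟩
    simp only [List.mem_map]
    exact ⟨((m : Int), (rows[k]'hk)[m]'hm),
      (PySem.List.mem_enumerate_iff _ 0 _).mpr ⟨m, hm, by simp⟩, by simp⟩

theorem pvMaps0Items (board : List (List Int)) :
    (pvA_boardToMaps2 board).items = pvKVList board 0 := by
  have h := pvItemsOuter board 0 PySem.Dict.empty (by
    intro k hk
    simp [show (PySem.Dict.empty : PySem.Dict (Int × Int) Int).keys = [] from rfl] at hk)
  simpa [pvA_boardToMaps2,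
    show (PySem.Dict.empty : PySem.Dict (Int × Int) Int).items = [] from rfl] using h

theorem pvMaps0Keys (board : List (List Int)) :
    (pvA_boardToMaps2 board).keys = pvKeyList board 0 := by
  rw [show ∀ (dd : PySem.Dict (Int × Int) Int), dd.keys = dd.items.map Prod.fst from
    fun _ => rfl, pvMaps0Items, pvKVfst]

theorem pvMaps0GetD (board : List (List Int)) (x y : Nat) (hx : x < board.length) :
    (pvA_boardToMaps2 board).getD ((x : Int), (y : Int)) 0 =
      if y < (board[x]'hx).length then (board[x]'hx).getD y 0 else 0 := by
  have hndk : (pvA_boardToMaps2 board).keys.Nodup := by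
    rw [pvMaps0Keys]; exact pvKeyList_nodup board 0
  by_cases hy : y < (board[x]'hx).length
  · rw [if_pos hy]
    have hmemitem : (((x : Int), (y : Int)), (board[x]'hx)[y]'hy) ∈
        (pvA_boardToMaps2 board).items := by
      rw [pvMaps0Items]
      simp only [pvKVList, List.mem_flatMap]
      refine ⟨((0 : Int) + (x : Int), board[x]'hx),
        (PySem.List.mem_enumerate_iff board 0 _).mpr ⟨x, hx, rfl⟩, ?_⟩
      simp only [List.mem_map]
      exact ⟨((y : Int), (board[x]'hx)[y]'hy),
        (PySem.List.mem_enumerate_iff _ 0 _).mpr ⟨y, hy, by simp⟩, by simp⟩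
    rw [PySem.Dict.getD_of_mem_items _ hmemitem hndk 0, List.getD_eq_getElem _ _ hy]
  · rw [if_neg hy]
    have hnk : ((x : Int), (y : Int)) ∉ (pvA_boardToMaps2 board).keys := by
      rw [pvMaps0Keys]
      intro hmem
      obtain ⟨k, hk, m, hm, hpe⟩ := (pvKeyList_char board 0 _).mp hmem
      have e1 : (x : Int) = 0 + (k : Int) := congrArg Prod.fst hpe
      have e2 : (y : Int) = (m : Int) := congrArg Prod.snd hpe
      have ekx : k = x := by omega
      subst ekx
      have : y < (board[k]'hx).length := by omega
      exact hy this
    have hcf : (pvA_boardToMaps2 board).contains ((x : Int), (y : Int)) = false := by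
      cases hcb : (pvA_boardToMaps2 board).contains ((x : Int), (y : Int))
      · rfl
      · exact absurd ((PySem.Dict.contains_iff_mem_keys
          (d := pvA_boardToMaps2 board) (k := ((x : Int), (y : Int)))).mp hcb) hnk
    exact PySem.Dict.getD_of_not_contains _ 0 hcf

theorem pvHfold (rows : List (List Int)) (s h : Int) (hh : h ≤ s) :
    (PySem.List.enumerate rows s).foldl
      (fun h iRow => if !iRow.2.isEmpty then iRow.1 + 1 else h) h
    = ((pvKeyList rows s).map Prod.fst).foldl max (h - 1) + 1 := by
  induction rows generalizing s h with
  | nil =>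
    simp [pvKeyList, PySem.List.enumerate]
  | cons x xs ih =>
    simp only [PySem.List.enumerate_cons, List.foldl_cons, pvKeyList, List.flatMap_cons,
      List.map_append, List.foldl_append]
    have hrow : ((PySem.List.enumerate x 0).map (fun jv => ((s : Int), jv.1))).map Prod.fst =
        (PySem.List.enumerate x 0).map (fun _ => (s : Int)) := by
      rw [List.map_map]; rfl
    rw [hrow]
    by_cases hxe : x.isEmpty
    · obtain rfl : x = [] := List.isEmpty_iff.mp hxe
      simp only [PySem.List.enumerate_nil, List.map_nil, List.foldl_nil, List.isEmpty_nil,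
        Bool.not_true, Bool.false_eq_true, if_false]
      exact ih (s + 1) h (by omega)
    · rcases x with _ | ⟨x0, xt⟩
      · simp at hxe
      have hconst : ((PySem.List.enumerate (x0 :: xt) 0).map (fun _ => (s : Int))).foldl max
          (h - 1) = s := by
        rw [pvFoldMaxEq _ _ s (List.mem_map.mpr
          ⟨(0, x0), by rw [PySem.List.enumerate_cons]; exact List.mem_cons_self .., rfl⟩)
          (fun z hz => by obtain ⟨_, _, rfl⟩ := List.mem_map.mp hz; exact le_refl s)]
        exact max_eq_right (by omega)
      rw [hconst]
      simp only [List.isEmpty_cons, Bool.not_false, if_true]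
      have hr := ih (s + 1) (s + 1) (le_refl _)
      rw [show (s : Int) + 1 - 1 = s from by ring] at hr
      exact hr

theorem pvWfold (rows : List (List Int)) (s w : Int) (hw : 0 ≤ w) :
    (PySem.List.enumerate rows s).foldl
      (fun w iRow => if (iRow.2.length : Int) > w then (iRow.2.length : Int) else w) w
    = ((pvKeyList rows s).map Prod.snd).foldl max (w - 1) + 1 := by
  induction rows generalizing s w with
  | nil =>
    simp [pvKeyList, PySem.List.enumerate]
  | cons x xs ih =>
    simp only [PySem.List.enumerate_cons, List.foldl_cons, pvKeyList, List.flatMap_cons,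
      List.map_append, List.foldl_append]
    have hrow : ((PySem.List.enumerate x 0).map (fun jv => ((s : Int), jv.1))).map Prod.snd =
        PySem.List.pyRange 0 (0 + (x.length : Int)) 1 := by
      rw [List.map_map]
      rw [show (Prod.snd ∘ fun jv : Int × Int => ((s : Int), jv.1)) =
        (Prod.fst : Int × Int → Int) from rfl]
      have h2 := PySem.List.map_fst_enumerate x 0
      rw [show (fun (x : Int × Int) => x.1) = (Prod.fst : Int × Int → Int) from rfl] at h2
      rw [h2]
    rw [hrow]
    have hstep : (if ((x.length : Int) > w) then (x.length : Int) else w) =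
        max w (x.length : Int) := by
      rcases lt_or_ge w (x.length : Int) with h | h
      · rw [if_pos h, max_eq_right (le_of_lt h)]
      · rw [if_neg (not_lt.mpr h), max_eq_left h]
    rw [hstep]
    by_cases hL0 : (x.length : Int) = 0
    · have hnil : PySem.List.pyRange 0 (0 + (x.length : Int)) 1 = [] :=
        PySem.List.pyRange_one_eq_nil (by omega)
      rw [hnil, List.foldl_nil, max_eq_left (by omega)]
      exact ih (s + 1) w hw
    · have hfold : (PySem.List.pyRange 0 (0 + (x.length : Int)) 1).foldl max (w - 1) =
          max (w - 1) ((x.length : Int) - 1) :=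
        pvFoldMaxEq _ _ _ ((PySem.List.mem_pyRange_one).mpr ⟨by omega, by omega⟩)
          (fun z hz => by have h3 := (PySem.List.mem_pyRange_one).mp hz; omega)
      rw [hfold]
      have hmm : max (w - 1) ((x.length : Int) - 1) = max w (x.length : Int) - 1 := by
        rcases le_total w (x.length : Int) with h | h
        · rw [max_eq_right (by omega), max_eq_right h]
        · rw [max_eq_left (by omega), max_eq_left h]
      rw [hmm]
      exact ih (s + 1) (max w (x.length : Int)) (le_trans hw (le_max_left _ _))

theorem get_ant_pos_spec : Claim_equal_get_ant_pos := by
  intro board c r n dir _hdom hpre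
  obtain ⟨hany, hpos⟩ := hpre
  rw [Spec_get_ant_pos, get_ant_pos, get_ant_pos_alt]
  have hkeys0 : (pvA_boardToMaps2 board).keys = pvKeyList board 0 := pvMaps0Keys board
  have hne : pvKeyList board 0 ≠ [] := pvKeyList_ne board hany
  have hb := pvKeyList_bounds board 0
  set d0 : Int := if dir = 1 ∨ dir = 2 ∨ dir = 3 then PySem.Int.mod (-dir) 4 else 0 with hd0
  set inc0 : List (Int × Int) :=
    if dir = 1 ∨ dir = 2 ∨ dir = 3 then
      pvA_rot1^[dir.toNat] [(-1, 0), (0, -1), (1, 0), (0, 1)]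
    else [(-1, 0), (0, -1), (1, 0), (0, 1)] with hinc0
  have hdir : (d0 = 0 ∨ d0 = 1 ∨ d0 = 2 ∨ d0 = 3) ∧ inc0 = pvCyc d0 := by
    rw [hd0, hinc0]
    by_cases hd : dir = 1 ∨ dir = 2 ∨ dir = 3
    · rw [if_pos hd, if_pos hd]
      rcases hd with rfl | rfl | rfl
      · exact ⟨by decide, by decide⟩
      · exact ⟨by decide, by decide⟩
      · exact ⟨by decide, by decide⟩
    · rw [if_neg hd, if_neg hd]
      exact ⟨Or.inl rfl, rfl⟩
  obtain ⟨p0, hp0mem, hp0f, hp0s⟩ : ∃ p ∈ pvKeyList board 0, 0 ≤ p.1 ∧ 0 ≤ p.2 := by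
    rcases hKL : pvKeyList board 0 with _ | ⟨k1, ks⟩
    · exact absurd hKL hne
    · have hbk := hb k1 (by rw [hKL]; exact List.mem_cons_self ..)
      exact ⟨k1, List.mem_cons_self .., hbk.1, hbk.2⟩
  have hH := pvHfold board 0 0 (le_refl 0)
  have hW := pvWfold board 0 0 (le_refl 0)
  have hHrw : ((pvKeyList board 0).map Prod.fst).foldl max (0 - 1) =
      ((pvKeyList board 0).map Prod.fst).foldl max 0 :=
    pvFoldMaxInit _ _ _ (by omega) ⟨p0.1, List.mem_map_of_mem hp0mem, hp0f⟩
  have hWrw : ((pvKeyList board 0).map Prod.snd).foldl max (0 - 1) =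
      ((pvKeyList board 0).map Prod.snd).foldl max 0 :=
    pvFoldMaxInit _ _ _ (by omega) ⟨p0.2, List.mem_map_of_mem hp0mem, hp0s⟩
  rw [hHrw] at hH
  rw [hWrw] at hW
  set rhi0 := ((pvKeyList board 0).map Prod.fst).foldl max 0 with hrhi0
  set chi0 := ((pvKeyList board 0).map Prod.snd).foldl max 0 with hchi0
  rw [PySem.List.foldl_prod_mk
    (f := fun h (iRow : Int × List Int) => if !iRow.2.isEmpty then iRow.1 + 1 else h)
    (g := fun w (iRow : Int × List Int) =>
      if (iRow.2.length : Int) > w then (iRow.2.length : Int) else w), hH, hW]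
  -- bounds
  have hub : ∀ p ∈ pvKeyList board 0, p.1 ≤ (board.length : Int) - 1 := by
    intro p hp
    obtain ⟨k, hk, m, hm, rfl⟩ := (pvKeyList_char board 0 p).mp hp
    simp only
    omega
  have hblen : 0 < board.length := by
    obtain ⟨k, hk, -⟩ := (pvKeyList_char board 0 p0).mp hp0mem
    omega
  have hrhiub : rhi0 ≤ (board.length : Int) - 1 :=
    pvFoldMaxUB _ _ _ (by omega) (fun z hz => by
      obtain ⟨p, hp, rfl⟩ := List.mem_map.mp hz
      exact hub p hp)
  have hrhi00 : 0 ≤ rhi0 := (PySem.List.le_foldl_max _ 0).1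
  have hchi00 : 0 ≤ chi0 := (PySem.List.le_foldl_max _ 0).1
  have hgrid0 : (PySem.List.slice board none (some (rhi0 + 1))).map (fun row =>
      (PySem.List.pyRange 0 (chi0 + 1) 1).map (fun j =>
        if j < (row.length : Int) then PySem.List.pyGetD row j 0 else 0)) =
      pvRender (pvA_boardToMaps2 board) 0 rhi0 0 chi0 := by
    apply pvRenderExt
    · rw [List.length_map, PySem.List.slice_to _ (by omega), List.length_take]
      omega
    · intro x hx
      rw [List.getElem_map, List.length_map, PySem.List.length_pyRange_one]
    · intro x y hx hy
      have hxb : x < board.length := by omega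
      have hsl : PySem.List.slice board none (some (rhi0 + 1)) =
          board.take (rhi0 + 1).toNat := PySem.List.slice_to _ (by omega)
      have hxlt : x < ((PySem.List.slice board none (some (rhi0 + 1))).map (fun row =>
          (PySem.List.pyRange 0 (chi0 + 1) 1).map (fun j =>
            if j < (row.length : Int) then PySem.List.pyGetD row j 0 else 0))).length := by
        rw [List.length_map, hsl, List.length_take]
        omega
      rw [List.getD_eq_getElem _ _ hxlt, List.getElem_map]
      simp only [hsl, List.getElem_take]
      have hylt : y < ((PySem.List.pyRange 0 (chi0 + 1) 1).map (fun j =>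
          if j < ((board[x]'hxb).length : Int) then PySem.List.pyGetD (board[x]'hxb) j 0
          else 0)).length := by
        rw [List.length_map, PySem.List.length_pyRange_one]
        omega
      rw [List.getD_eq_getElem _ _ hylt, List.getElem_map, PySem.List.getElem_pyRange_one]
      simp only [zero_add]
      rw [pvMaps0GetD board x y hxb]
      by_cases hyy : y < (board[x]'hxb).length
      · rw [if_pos (by exact_mod_cast hyy), if_pos hyy, PySem.List.pyGetD_natCast]
      · rw [if_neg (by omega), if_neg hyy]
  have hrlo0 : ((pvA_boardToMaps2 board).keys.map Prod.fst).foldl min 0 = 0 := by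
    rw [hkeys0]
    exact pvFoldMinNonneg _ (fun z hz => by
      obtain ⟨p, hp, rfl⟩ := List.mem_map.mp hz
      exact (hb p hp).1)
  have hclo0 : ((pvA_boardToMaps2 board).keys.map Prod.snd).foldl min 0 = 0 := by
    rw [hkeys0]
    exact pvFoldMinNonneg _ (fun z hz => by
      obtain ⟨p, hp, rfl⟩ := List.mem_map.mp hz
      exact (hb p hp).2)
  have hrhi0k : ((pvA_boardToMaps2 board).keys.map Prod.fst).foldl max 0 = rhi0 := by
    rw [hkeys0]
  have hchi0k : ((pvA_boardToMaps2 board).keys.map Prod.snd).foldl max 0 = chi0 := by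
    rw [hkeys0]
  have hrel0 : pvRel (pvA_boardToMaps2 board, r, c, inc0)
      ((PySem.List.slice board none (some (rhi0 + 1))).map (fun row =>
        (PySem.List.pyRange 0 (chi0 + 1) 1).map (fun j =>
          if j < (row.length : Int) then PySem.List.pyGetD row j 0 else 0)), r, c, d0) := by
    refine ⟨?_, ?_, ?_, ?_, hdir.1, hdir.2, ?_⟩
    · rw [hkeys0]
      exact pvKeyList_nodup board 0
    · exact ⟨p0, by rw [hkeys0]; exact hp0mem, hp0f, hp0s⟩
    · simp only
      rw [hrlo0]
      ring
    · simp only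
      rw [hclo0]
      ring
    · simp only
      rw [hrlo0, hclo0, hrhi0k, hchi0k]
      exact hgrid0
  rw [pvFoldConst, pvFoldConst,
    show (PySem.List.pyRange 1 (n + 1) 1).length = n.toNat from by
      rw [PySem.List.length_pyRange_one]; congr 1; ring,
    show (PySem.List.pyRange 0 n 1).length = n.toNat from by
      rw [PySem.List.length_pyRange_one]; congr 1; ring]
  have hrelN : pvRel (pvStepA^[n.toNat] (pvA_boardToMaps2 board, r, c, inc0))
      (pvStepB^[n.toNat] ((PySem.List.slice board none (some (rhi0 + 1))).map (fun row =>
        (PySem.List.pyRange 0 (chi0 + 1) 1).map (fun j =>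
          if j < (row.length : Int) then PySem.List.pyGetD row j 0 else 0)), r, c, d0)) := by
    by_cases hn : 0 < n
    · have hcont : (pvA_boardToMaps2 board).contains (r, c) = true := by
        rw [PySem.Dict.contains_iff_mem_keys, hkeys0]
        obtain ⟨e1, e2, e3, e4⟩ := hpos hn
        exact pvKeyList_mem board r c e1 e2 e3 e4
      exact (pvIter _ _ ⟨hrel0, hcont⟩ n.toNat).1
    · rw [Int.toNat_of_nonpos (by omega)]
      exact hrel0
  obtain ⟨hndN, hexN, -, -, -, -, hgridN⟩ := hrelN
  rw [hgridN]
  exact pvFinal _ hndN hexN
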